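-- pv_equiv track=rewrite | github.com/grupyrp/dojos | 2018-08-30/programa.py | map_mine
-- ===== SOURCE A (Python) =====
-- def map_mine(width, height, bombs=tuple()):
--     _map = []
--     for i in range(height):
--         line = []
--         for k in range(width):
--             if (i, k) in bombs:
--                 line.append("*")
--             elif i == 2 or k == 3:
--                 line.append("0")
--             else:
--                 line.append("1" if bombs else "0")
--         _map.append("".join(line))
--
--     return _map
-- ===== SOURCE B (Python) =====
-- def map_mine(width, height, bombs=tuple()):
--     base = "1" if bombs else "0"
--     grid = [[base] * width for _ in range(height)]
--     if height > 2:
--         grid[2] = ["0"] * width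
--     if width > 3:
--         for row in grid:
--             row[3] = "0"
--     for r, c in bombs:
--         if 0 <= r < height and 0 <= c < width:
--             grid[r][c] = "*"
--     return ["".join(row) for row in grid]
-- ===== Notes on version B (the rewrite author's own statement) =====
-- stated objective: alternative
-- what changed: A decides each cell with a per-cell branch cascade (scanning the bomb list for every cell) inside nested loops; B builds a base-filled mutable grid, overwrites row 2 and column 3 wholesale, then stamps each in-bounds bomb once, removing the per-cell bomb-list scan.
import Mathlib
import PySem

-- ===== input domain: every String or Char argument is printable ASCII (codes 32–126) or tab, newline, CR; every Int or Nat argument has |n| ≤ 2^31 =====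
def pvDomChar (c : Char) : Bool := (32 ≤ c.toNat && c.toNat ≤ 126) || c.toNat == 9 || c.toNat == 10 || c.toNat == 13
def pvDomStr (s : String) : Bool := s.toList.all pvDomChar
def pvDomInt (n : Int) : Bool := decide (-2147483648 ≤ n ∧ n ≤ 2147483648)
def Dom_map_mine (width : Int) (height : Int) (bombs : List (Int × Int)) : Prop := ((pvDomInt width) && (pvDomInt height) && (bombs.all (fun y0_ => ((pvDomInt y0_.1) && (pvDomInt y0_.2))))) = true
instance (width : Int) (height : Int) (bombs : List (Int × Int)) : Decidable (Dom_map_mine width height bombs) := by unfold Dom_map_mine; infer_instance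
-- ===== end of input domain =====

-- B builds a base-filled grid, zeroes row 2 and column 3 wholesale, then stamps each
-- in-bounds bomb once instead of A's per-cell scan of the bomb list (objective: alternative).


-- ===== PORT A =====
-- literal transliteration of A: per cell, bombs membership first, then the i==2 / k==3
-- branch, then "1" iff bombs is non-empty; each row joined with "".join
def map_mine (width : Int) (height : Int) (bombs : List (Int × Int)) : List String :=
  (PySem.List.pyRange 0 height).map (fun i =>
    PySem.Str.join "" ((PySem.List.pyRange 0 width).map (fun k =>
      if (i, k) ∈ bombs then "*"
      else if i = 2 ∨ k = 3 then "0"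
      else if bombs ≠ [] then "1" else "0")))

-- ===== PORT B =====
-- the bomb-stamping loop body of Source B (grid[r][c] = "*" under the bounds check)
def mmStamp (width : Int) (height : Int) (g : List (List String)) (rc : Int × Int) : List (List String) :=
  if 0 ≤ rc.1 ∧ rc.1 < height ∧ 0 ≤ rc.2 ∧ rc.2 < width then
    g.modify rc.1.toNat (fun row => row.set rc.2.toNat "*")
  else g

def map_mine_alt (width : Int) (height : Int) (bombs : List (Int × Int)) : List String :=
  let base : String := if bombs ≠ [] then "1" else "0"
  let grid0 : List (List String) := (PySem.List.pyRange 0 height).map (fun _ => PySem.List.pyRepeat [base] width)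
  let grid1 := if height > 2 then grid0.set 2 (PySem.List.pyRepeat ["0"] width) else grid0
  let grid2 := if width > 3 then grid1.map (fun row => row.set 3 "0") else grid1
  let grid3 := bombs.foldl (mmStamp width height) grid2
  grid3.map (fun row => PySem.Str.join "" row)

-- ===== PRECONDITION & SPEC =====
def Spec_map_mine (width : Int) (height : Int) (bombs : List (Int × Int)) (out : List String) : Prop := out = map_mine_alt width height bombs
instance (width : Int) (height : Int) (bombs : List (Int × Int)) (out : List String) : Decidable (Spec_map_mine width height bombs out) := by unfold Spec_map_mine; infer_instance

-- ===== CLAIM (what is proved, stated in full; the proofs are below) =====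
def Claim_equal_map_mine : Prop := ∀ (width : Int) (height : Int) (bombs : List (Int × Int)), Dom_map_mine width height bombs → Spec_map_mine width height bombs (map_mine width height bombs)

-- ===== LEMMAS AND PROOFS =====

-- total cell access into the nested grid (getElem?/getD avoids dependent index proofs)
def mmGet (g : List (List String)) (i k : Nat) : String := (g[i]?.getD [])[k]?.getD ""

lemma mmStamp_length (width height : Int) (g : List (List String)) (rc : Int × Int) :
    (mmStamp width height g rc).length = g.length := by
  unfold mmStamp; split <;> simp

lemma mmStamp_rowlen (width height : Int) (g : List (List String)) (rc : Int × Int)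
    (i : Nat) : ((mmStamp width height g rc)[i]?.getD []).length = (g[i]?.getD []).length := by
  unfold mmStamp
  split
  · rw [List.getElem?_modify]
    cases h : g[i]?
    · simp
    · simp only [Option.map_eq_map, Option.map_some, Option.getD_some]
      split <;> simp
  · rfl

-- one stamping step writes "*" exactly at an in-bounds bomb position
lemma mmStamp_get (width height : Int) (g : List (List String)) (b : Int × Int)
    (hlen : g.length = height.toNat)
    (hrow : ∀ j, j < g.length → (g[j]?.getD []).length = width.toNat)
    (i k : Nat) (hi : i < height.toNat) (hk : k < width.toNat) :
    mmGet (mmStamp width height g b) i k =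
      (if ((i : Int), (k : Int)) = b then "*" else mmGet g i k) := by
  obtain ⟨r, c⟩ := b
  have hib : i < g.length := by omega
  have hgi : g[i]? = some g[i] := List.getElem?_eq_getElem hib
  have hki : k < g[i].length := by
    have := hrow i hib; rw [hgi] at this; simp at this; omega
  unfold mmStamp
  split
  · rename_i hb
    obtain ⟨h1, h2, h3, h4⟩ := hb
    simp only [mmGet, List.getElem?_modify, hgi, Option.map_eq_map, Option.map_some,
      Option.getD_some]
    by_cases he : r.toNat = i
    · rw [if_pos he]
      rw [List.getElem?_set]
      by_cases he2 : c.toNat = k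
      · rw [if_pos he2, if_pos (by omega), if_pos (by simp at h1 h3 ⊢; omega)]
        simp
      · rw [if_neg he2, if_neg (by simp at h1 h3 ⊢; intro hik hkc; omega)]
    · rw [if_neg he, if_neg (by simp at h1 ⊢; intro hik hkc; omega)]
  · rename_i hb
    rw [if_neg ?_]
    simp only [Prod.mk.injEq, not_and]
    intro hik hkc
    exact absurd ⟨by omega, by omega, by omega, by omega⟩ hb

-- the stamped grid: "*" exactly where some in-bounds bomb of the list hits
lemma mmStamp_fold_get (width height : Int) (bombs : List (Int × Int)) :
    ∀ (g : List (List String)), g.length = height.toNat →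
      (∀ j, j < g.length → (g[j]?.getD []).length = width.toNat) →
      ∀ i k, i < height.toNat → k < width.toNat →
        mmGet (bombs.foldl (mmStamp width height) g) i k =
          (if ((i : Int), (k : Int)) ∈ bombs then "*" else mmGet g i k) := by
  induction bombs with
  | nil => intro g _ _ i k _ _; simp
  | cons b rest ih =>
    intro g hlen hrow i k hi hk
    simp only [List.foldl_cons]
    rw [ih _ (by rw [mmStamp_length]; exact hlen)
      (fun j hj => by rw [mmStamp_rowlen]; exact hrow j (by rwa [mmStamp_length] at hj))
      i k hi hk]
    rw [mmStamp_get width height g b hlen hrow i k hi hk]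
    by_cases hm : ((i : Int), (k : Int)) ∈ rest <;>
      by_cases hb : ((i : Int), (k : Int)) = b <;>
      simp [hm, hb, List.mem_cons]

-- the pre-bomb grid of B: row-2 / column-3 zeros over the base fill
lemma mmGrid2_get (width height : Int) (base : String) (i k : Nat)
    (hi : i < height.toNat) (hk : k < width.toNat) :
    mmGet (if width > 3 then
        ((if height > 2 then
            ((PySem.List.pyRange 0 height).map (fun _ => PySem.List.pyRepeat [base] width)).set 2 (PySem.List.pyRepeat ["0"] width)
          else ((PySem.List.pyRange 0 height).map (fun _ => PySem.List.pyRepeat [base] width)))).map (fun row => row.set 3 "0")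
      else (if height > 2 then
            ((PySem.List.pyRange 0 height).map (fun _ => PySem.List.pyRepeat [base] width)).set 2 (PySem.List.pyRepeat ["0"] width)
          else ((PySem.List.pyRange 0 height).map (fun _ => PySem.List.pyRepeat [base] width)))) i k =
      (if (i : Int) = 2 ∨ (k : Int) = 3 then "0" else base) := by
  have hi' : i < ((PySem.List.pyRange 0 height).map (fun _ => PySem.List.pyRepeat [base] width)).length := by
    simp [PySem.List.length_pyRange_one]; omega
  by_cases hw : width > 3 <;> by_cases hh : height > 2 <;>
    simp only [mmGet, hw, hh, if_true, if_false, List.getElem?_map, List.getElem?_set,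
      PySem.List.pyRepeat_singleton, List.getElem?_eq_getElem hi', List.getElem_map,
      Option.map_some, Option.getD_some, List.getElem?_replicate, List.length_replicate] <;>
    split_ifs <;>
    simp_all [List.getElem?_replicate, PySem.List.length_pyRange_one,
      List.getElem?_eq_getElem hi', List.getElem_map, List.getElem_set,
      List.getElem_replicate] <;>
    first
      | omega
      | (split_ifs <;> simp_all <;> omega)

lemma mmGrid2_shape (width height : Int) (base : String) :
    (if width > 3 then
        ((if height > 2 then
            ((PySem.List.pyRange 0 height).map (fun _ => PySem.List.pyRepeat [base] width)).set 2 (PySem.List.pyRepeat ["0"] width)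
          else ((PySem.List.pyRange 0 height).map (fun _ => PySem.List.pyRepeat [base] width)))).map (fun row => row.set 3 "0")
      else (if height > 2 then
            ((PySem.List.pyRange 0 height).map (fun _ => PySem.List.pyRepeat [base] width)).set 2 (PySem.List.pyRepeat ["0"] width)
          else ((PySem.List.pyRange 0 height).map (fun _ => PySem.List.pyRepeat [base] width)))).length = height.toNat := by
  by_cases hw : width > 3 <;> by_cases hh : height > 2 <;>
    simp [hw, hh, PySem.List.length_pyRange_one]

lemma mmGrid2_rowlen (width height : Int) (base : String) (j : Nat) (hj : j < height.toNat) :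
    (((if width > 3 then
        ((if height > 2 then
            ((PySem.List.pyRange 0 height).map (fun _ => PySem.List.pyRepeat [base] width)).set 2 (PySem.List.pyRepeat ["0"] width)
          else ((PySem.List.pyRange 0 height).map (fun _ => PySem.List.pyRepeat [base] width)))).map (fun row => row.set 3 "0")
      else (if height > 2 then
            ((PySem.List.pyRange 0 height).map (fun _ => PySem.List.pyRepeat [base] width)).set 2 (PySem.List.pyRepeat ["0"] width)
          else ((PySem.List.pyRange 0 height).map (fun _ => PySem.List.pyRepeat [base] width))))[j]?.getD []).length) = width.toNat := by
  have hj' : j < ((PySem.List.pyRange 0 height).map (fun _ => PySem.List.pyRepeat [base] width)).length := by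
    simp [PySem.List.length_pyRange_one]; omega
  by_cases hw : width > 3 <;> by_cases hh : height > 2 <;>
    simp only [hw, hh, if_true, if_false, List.getElem?_map, List.getElem?_set,
      PySem.List.pyRepeat_singleton, List.getElem?_eq_getElem hj', List.getElem_map,
      Option.map_some, Option.getD_some, List.length_replicate, List.length_set] <;>
    (try split_ifs) <;> simp_all [PySem.List.length_pyRange_one]

lemma mmFold_length (width height : Int) (bombs : List (Int × Int)) (g : List (List String)) :
    (bombs.foldl (mmStamp width height) g).length = g.length := by
  induction bombs generalizing g with
  | nil => rfl
  | cons b rest ih => rw [List.foldl_cons, ih, mmStamp_length]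

lemma mmFold_rowlen (width height : Int) (bombs : List (Int × Int)) (g : List (List String)) (j : Nat) :
    ((bombs.foldl (mmStamp width height) g)[j]?.getD []).length = (g[j]?.getD []).length := by
  induction bombs generalizing g with
  | nil => rfl
  | cons b rest ih => rw [List.foldl_cons, ih, mmStamp_rowlen]

lemma mm_main : ∀ (width : Int) (height : Int) (bombs : List (Int × Int)),
    (PySem.List.pyRange 0 height).map (fun i =>
      PySem.Str.join "" ((PySem.List.pyRange 0 width).map (fun k =>
        if (i, k) ∈ bombs then "*"
        else if i = 2 ∨ k = 3 then "0"
        else if bombs ≠ [] then "1" else "0"))) =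
    (let base : String := if bombs ≠ [] then "1" else "0"
     let grid0 : List (List String) := (PySem.List.pyRange 0 height).map (fun _ => PySem.List.pyRepeat [base] width)
     let grid1 := if height > 2 then grid0.set 2 (PySem.List.pyRepeat ["0"] width) else grid0
     let grid2 := if width > 3 then grid1.map (fun row => row.set 3 "0") else grid1
     let grid3 := bombs.foldl (mmStamp width height) grid2
     grid3.map (fun row => PySem.Str.join "" row)) := by
  intro width height bombs
  dsimp only
  set base : String := if bombs ≠ [] then "1" else "0" with hbase
  set g2 := (if width > 3 then
        ((if height > 2 then
            ((PySem.List.pyRange 0 height).map (fun _ => PySem.List.pyRepeat [base] width)).set 2 (PySem.List.pyRepeat ["0"] width)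
          else ((PySem.List.pyRange 0 height).map (fun _ => PySem.List.pyRepeat [base] width)))).map (fun row => row.set 3 "0")
      else (if height > 2 then
            ((PySem.List.pyRange 0 height).map (fun _ => PySem.List.pyRepeat [base] width)).set 2 (PySem.List.pyRepeat ["0"] width)
          else ((PySem.List.pyRange 0 height).map (fun _ => PySem.List.pyRepeat [base] width)))) with hgrid2
  have hlen2 : g2.length = height.toNat := mmGrid2_shape width height base
  have hlen3 : (bombs.foldl (mmStamp width height) g2).length = height.toNat := by
    rw [mmFold_length]; exact hlen2
  apply List.ext_getElem
  · simp [PySem.List.length_pyRange_one, hlen3]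
  · intro i hL hR
    have hi : i < height.toNat := by simpa [PySem.List.length_pyRange_one] using hL
    simp only [List.getElem_map, PySem.List.getElem_pyRange_one, zero_add]
    congr 1
    -- row equality
    have hfold : ∀ j, j < height.toNat →
        ((bombs.foldl (mmStamp width height) g2)[j]?.getD []).length = width.toNat := by
      intro j hj
      rw [mmFold_rowlen, hgrid2]
      exact mmGrid2_rowlen width height base j hj
    have hrowlen : (bombs.foldl (mmStamp width height) g2)[i].length = width.toNat := by
      have h1 := hfold i hi
      rwa [List.getElem?_eq_getElem (by rw [mmFold_length, hlen2]; exact hi), Option.getD_some] at h1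
    apply List.ext_getElem
    · simp [PySem.List.length_pyRange_one, hrowlen]
    · intro k hkL hkR
      have hk : k < width.toNat := by simpa [PySem.List.length_pyRange_one] using hkL
      simp only [List.getElem_map, PySem.List.getElem_pyRange_one, zero_add]
      have hmm : mmGet (bombs.foldl (mmStamp width height) g2) i k =
          (bombs.foldl (mmStamp width height) g2)[i][k] := by
        have e1 : (bombs.foldl (mmStamp width height) g2)[i]?.getD [] =
            (bombs.foldl (mmStamp width height) g2)[i] := by
          rw [List.getElem?_eq_getElem (by rw [mmFold_length, hlen2]; exact hi), Option.getD_some]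
        unfold mmGet
        rw [e1, List.getElem?_eq_getElem (by rw [hrowlen]; exact hk), Option.getD_some]
      rw [← hmm,
        mmStamp_fold_get width height bombs g2 hlen2
          (fun j hj => by rw [hgrid2]; exact mmGrid2_rowlen width height base j (by omega)) i k hi hk]
      rw [hgrid2, mmGrid2_get width height base i k hi hk]

-- ===== VERDICT (by name: the statement is the Claim_ definition above) =====
theorem map_mine_spec : Claim_equal_map_mine := fun width height bombs _ => mm_main width height bombs
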